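-- pv_equiv track=rewrite | github.com/dwmarshall/everybodycodes | stories/01/q1.py | eni
-- ===== SOURCE A (Python) =====
-- def eni(n: int, exp: int, mod: int) -> int:
--     remainders: list[str] = []
--
--     score: int = 1
--     for _ in range(exp):
--         score *= n
--         score %= mod
--         remainders.append(str(score))
--     remainders.reverse()
--     return int("".join(remainders))
-- ===== SOURCE B (Python) =====
-- def eni(n: int, exp: int, mod: int) -> int:
--     # each term is an independent modular power, emitted directly in output order
--     return int("".join(str(pow(n, i, mod)) for i in range(exp, 0, -1)))
-- ===== Notes on version B (the rewrite author's own statement) =====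
-- stated objective: alternative
-- what changed: B computes each emitted term independently as pow(n, i, mod) (built-in modular exponentiation) iterating i from exp down to 1, emitting terms directly in output order, so A's threaded running score, its remainder list and its reverse pass all disappear.
import Mathlib
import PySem

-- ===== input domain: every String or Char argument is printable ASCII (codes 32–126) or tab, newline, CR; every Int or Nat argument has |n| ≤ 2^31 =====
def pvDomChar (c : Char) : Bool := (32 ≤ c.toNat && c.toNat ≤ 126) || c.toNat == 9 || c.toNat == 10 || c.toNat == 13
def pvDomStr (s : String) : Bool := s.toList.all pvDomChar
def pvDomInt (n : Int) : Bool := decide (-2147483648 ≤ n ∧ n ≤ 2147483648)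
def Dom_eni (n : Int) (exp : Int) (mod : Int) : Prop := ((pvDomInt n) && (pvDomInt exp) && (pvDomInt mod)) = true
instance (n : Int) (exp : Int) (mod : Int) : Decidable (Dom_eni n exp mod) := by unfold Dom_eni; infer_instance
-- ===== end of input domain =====

-- B computes each emitted term independently as pow(n, i, mod) (modular exponentiation),
-- iterating i from exp down to 1, so A's threaded running score, its remainder list and its
-- reverse pass all disappear; objective: alternative. Return values only; neither mutates.

-- ===== PORT A =====
-- the loop body: remainders list grows at the back, score is threaded through
def eniStepA (n : Int) (mod : Int) (st : List String × Int) : List String × Int :=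
  let score := st.2 * n
  let score := PySem.Int.mod score mod
  (st.1 ++ [PySem.Int.toStr score], score)

def eni (n : Int) (exp : Int) (mod : Int) : Int :=
  let st := (PySem.List.pyRange 0 exp 1).foldl (fun st _ => eniStepA n mod st) ([], 1)
  let remainders := st.1.reverse
  (PySem.Int.ofStr? (PySem.Str.join "" remainders)).getD 0

-- ===== PORT B =====
-- pow(n, i, mod) is PySem.Int.powMod; i ≥ 1 on every element of range(exp, 0, -1), so
-- i.toNat is exactly Python's nonnegative exponent there
def eni_alt (n : Int) (exp : Int) (mod : Int) : Int :=
  let parts := (PySem.List.pyRange exp 0 (-1)).map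
    (fun i => PySem.Int.toStr (PySem.Int.powMod n i.toNat mod))
  (PySem.Int.ofStr? (PySem.Str.join "" parts)).getD 0

-- ===== PRECONDITION & SPEC =====
-- Pre_ excludes exactly the inputs where the Python A raises: exp ≤ 0 (ValueError, int("")),
-- mod = 0 (ZeroDivisionError), and mod < 0 with exp ≥ 2 and mod ∤ n, where a negative
-- remainder puts a '-' sign mid-string and int() raises ValueError.
def Pre_eni (n : Int) (exp : Int) (mod : Int) : Prop :=
  1 ≤ exp ∧ mod ≠ 0 ∧ (1 ≤ mod ∨ exp = 1 ∨ PySem.Int.mod n mod = 0)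
instance (n : Int) (exp : Int) (mod : Int) : Decidable (Pre_eni n exp mod) := by unfold Pre_eni; infer_instance

def pvWitness_eni : Int × Int × Int := (3, 5, 7)

def Spec_eni (n : Int) (exp : Int) (mod : Int) (out : Int) : Prop := out = eni_alt n exp mod
instance (n : Int) (exp : Int) (mod : Int) (out : Int) : Decidable (Spec_eni n exp mod out) := by unfold Spec_eni; infer_instance

-- ===== CLAIM (what is proved, stated in full; the proofs are below) =====
def Claim_equal_eni : Prop := ∀ (n : Int) (exp : Int) (mod : Int), Dom_eni n exp mod → Pre_eni n exp mod → Spec_eni n exp mod (eni n exp mod)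

-- ===== LEMMAS AND PROOFS =====

-- range(exp, 0, -1), enumerated top-down
theorem pyRange_down (e : Int) (he : 1 ≤ e) :
    PySem.List.pyRange e 0 (-1) = (List.range e.toNat).map (fun k : Nat => e - (k : Int)) := by
  simp only [PySem.List.pyRange]
  rw [if_neg (by norm_num), if_neg (by norm_num), if_pos (by omega : (0:Int) < e)]
  have hc : ((e - 0 + - -1 - 1) / - -1).toNat = e.toNat := by norm_num
  rw [hc]
  apply List.map_congr_left
  intro k _
  ring

-- the remainder strings A's loop appends, starting from score s, for k iterations
def remsA (n m : Int) : Int → Nat → List String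
  | _, 0 => []
  | s, Nat.succ k =>
      PySem.Int.toStr (PySem.Int.mod (s * n) m) :: remsA n m (PySem.Int.mod (s * n) m) k

-- A's fold appends exactly remsA, one string per loop iteration
theorem eni_loopA (n m : Int) (l : List Int) : ∀ (rs : List String) (s : Int),
    (l.foldl (fun st _ => eniStepA n m st) (rs, s)).1 = rs ++ remsA n m s l.length := by
  induction l with
  | nil => intro rs s; simp [remsA]
  | cons a l ih =>
      intro rs s
      simp only [List.foldl_cons, List.length_cons]
      rw [show eniStepA n m (rs, s)
            = (rs ++ [PySem.Int.toStr (PySem.Int.mod (s * n) m)], PySem.Int.mod (s * n) m) from rfl]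
      rw [ih]
      simp [remsA]

-- Python '%' absorbs an earlier '%' under multiplication
theorem pymod_mul (a c m : Int) :
    PySem.Int.mod (PySem.Int.mod a m * c) m = PySem.Int.mod (a * c) m := by
  simp only [PySem.Int.mod]
  rw [Int.fmod_def a m]
  have h : (a - m * (a.fdiv m)) * c = a * c - m * (a.fdiv m * c) := by ring
  rw [h, Int.sub_mul_fmod_self_left]

-- the threaded scores are the successive modular powers
theorem remsA_char (n m : Int) : ∀ (k : Nat) (s : Int),
    remsA n m s k
      = (List.range k).map (fun j : Nat => PySem.Int.toStr (PySem.Int.mod (s * n ^ (j + 1)) m)) := by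
  intro k
  induction k with
  | zero => intro s; simp [remsA]
  | succ k ih =>
      intro s
      rw [remsA, ih, List.range_succ_eq_map, List.map_cons, List.map_map]
      congr 1
      · rw [pow_one]
      · apply List.map_congr_left
        intro j _
        simp only [Function.comp]
        rw [pymod_mul, show s * n * n ^ (j + 1) = s * n ^ (j.succ + 1)
              by simp only [Nat.succ_eq_add_one, pow_succ]; ring]

-- ===== VERDICT (by name: the statement is the Claim_ definition above) =====
theorem eni_spec : Claim_equal_eni := by
  intro n exp m _ hpre
  obtain ⟨h1, _, _⟩ := hpre
  unfold Spec_eni eni eni_alt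
  dsimp only
  have he : (0:Int) ≤ exp := by omega
  have hA : PySem.List.pyRange 0 exp 1 = (List.range exp.toNat).map (fun k : Nat => (k:Int)) := by
    have h := PySem.List.pyRange_zero_natCast exp.toNat
    rwa [Int.toNat_of_nonneg he] at h
  have hfold := eni_loopA n m (PySem.List.pyRange 0 exp 1) [] 1
  rw [hA] at hfold ⊢
  simp only [List.length_map, List.length_range, List.nil_append] at hfold
  rw [hfold, remsA_char, pyRange_down exp h1, List.map_map]
  have hlist : ((List.range exp.toNat).map
        (fun j : Nat => PySem.Int.toStr (PySem.Int.mod (1 * n ^ (j + 1)) m))).reverse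
      = (List.range exp.toNat).map
        ((fun i : Int => PySem.Int.toStr (PySem.Int.powMod n i.toNat m)) ∘ (fun k : Nat => exp - (k : Int))) := by
    apply List.ext_getElem
    · simp
    · intro i hi1 hi2
      simp only [List.getElem_reverse, List.getElem_map, List.getElem_range,
        List.length_map, List.length_range, Function.comp] at *
      simp only [PySem.Int.powMod, one_mul]
      have hi : i < exp.toNat := by simpa using hi2
      have hexp : exp.toNat - 1 - i + 1 = (exp - (i:Int)).toNat := by omega
      rw [hexp]
  rw [hlist]
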